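-- pv_equiv track=rewrite | github.com/mlmarcosluan/coursera | Introdução à Ciência da Computação com Python/Parte 1/Semana 2/ordem_lex.py | primeiro_lex
-- ===== SOURCE A (Python) =====
-- def primeiro_lex (lista):
--
--     menor_lex = lista[0][0]
--
--     primeiro = lista[0]
--
--     for str in range (len (lista)):
--         lex = lista[str][0]
--
--         if ord (lex) < ord (menor_lex):
--             menor_lex = lista[str][0]
--             primeiro = lista[str]
--
--     return primeiro
-- ===== SOURCE B (Python) =====
-- def primeiro_lex(lista):
--     return sorted(lista, key=lambda e: ord(e[0]))[0]
-- ===== Notes on version B (the rewrite author's own statement) =====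
-- stated objective: idiomatic
-- what changed: Replaces the explicit index loop tracking a running minimum with a stable sort by first-char ordinal followed by taking the first element; stability preserves A's keep-first tie-breaking.
import Mathlib
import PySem

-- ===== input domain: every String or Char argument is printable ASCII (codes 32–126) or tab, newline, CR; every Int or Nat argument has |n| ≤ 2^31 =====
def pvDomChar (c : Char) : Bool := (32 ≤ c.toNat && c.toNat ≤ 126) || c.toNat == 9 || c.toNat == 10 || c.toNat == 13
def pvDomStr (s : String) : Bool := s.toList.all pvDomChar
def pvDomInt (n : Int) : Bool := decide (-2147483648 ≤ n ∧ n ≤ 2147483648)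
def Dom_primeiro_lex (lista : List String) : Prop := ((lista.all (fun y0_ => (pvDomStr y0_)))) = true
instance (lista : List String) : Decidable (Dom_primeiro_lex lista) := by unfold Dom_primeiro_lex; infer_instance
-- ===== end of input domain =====

-- B replaces A's explicit index loop with a stable sort by first-char ordinal and takes
-- the head; same return value on all inputs where A returns (A = B proved on Pre_ below).

-- ===== PORT A =====
-- s[0] as a Char; Pre_ excludes "" elements, where Python raises IndexError
def pvChA (s : String) : Char := (PySem.Str.pyGet? s 0).getD ' '

-- one loop body: lex = lista[str][0]; if ord(lex) < ord(menor_lex): update both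
def pvStepA (st : Char × String) (s : String) : Char × String :=
  if (pvChA s).toNat < st.1.toNat then (pvChA s, s) else st

def primeiro_lex (lista : List String) : String :=
  let primeiro0 := PySem.List.pyGetD lista 0 ""      -- lista[0]; Pre_ excludes []
  let menor0 := pvChA primeiro0                       -- lista[0][0]
  ((PySem.List.pyRange 0 (PySem.List.len lista) 1).foldl
      (fun st j => pvStepA st (PySem.List.pyGetD lista j "")) (menor0, primeiro0)).2

-- ===== PORT B =====
-- key=lambda e: ord(e[0]); Pre_ excludes "" elements, where Python raises IndexError
def pvKeyB (e : String) : Nat := ((PySem.Str.pyGet? e 0).getD ' ').toNat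

def primeiro_lex_alt (lista : List String) : String :=
  PySem.List.pyGetD (PySem.List.sorted lista pvKeyB false) 0 ""   -- sorted(...)[0]; Pre_ excludes []

-- ===== PRECONDITION & SPEC =====
-- Pre_ excludes exactly the inputs where Python A raises IndexError: the empty list
-- (lista[0]) and lists containing an empty string (lista[i][0]).
def Pre_primeiro_lex (lista : List String) : Prop :=
  lista ≠ [] ∧ ∀ s ∈ lista, s ≠ ""
instance (lista : List String) : Decidable (Pre_primeiro_lex lista) := by
  unfold Pre_primeiro_lex; infer_instance

def pvWitness_primeiro_lex : List String := ["bd", "ac", "a"]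

def Spec_primeiro_lex (lista : List String) (out : String) : Prop := out = primeiro_lex_alt lista
instance (lista : List String) (out : String) : Decidable (Spec_primeiro_lex lista out) := by unfold Spec_primeiro_lex; infer_instance

-- ===== CLAIM (what is proved, stated in full; the proofs are below) =====
def Claim_equal_primeiro_lex : Prop := ∀ (lista : List String), Dom_primeiro_lex lista → Pre_primeiro_lex lista → Spec_primeiro_lex lista (primeiro_lex lista)

-- ===== LEMMAS AND PROOFS =====

-- the common "keep-first running minimum by first-char key" step
def pvMinG (p s : String) : String := if pvKeyB s < pvKeyB p then s else p

-- A's paired fold keeps the invariant fst = pvChA snd, and its snd is the pvMinG fold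
theorem pvFoldA_eq (xs : List String) : ∀ (p : String),
    xs.foldl pvStepA (pvChA p, p) = (pvChA (xs.foldl pvMinG p), xs.foldl pvMinG p) := by
  induction xs with
  | nil => intro p; rfl
  | cons x xs ih =>
    intro p
    simp only [List.foldl_cons]
    have hstep : pvStepA (pvChA p, p) x = (pvChA (pvMinG p x), pvMinG p x) := by
      unfold pvStepA pvMinG pvKeyB pvChA
      split_ifs <;> rfl
    rw [hstep, ih]

-- head of inserting x into a nonempty acc: x wins only on strict key decrease
theorem pvHead_insertBy (x h : String) (t : List String) :
    (PySem.List.insertBy (fun a b => decide (pvKeyB a < pvKeyB b)) x (h :: t)).head?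
      = some (pvMinG h x) := by
  have hins : PySem.List.insertBy (fun a b => decide (pvKeyB a < pvKeyB b)) x (h :: t)
      = if pvKeyB x < pvKeyB h then x :: h :: t
        else h :: PySem.List.insertBy (fun a b => decide (pvKeyB a < pvKeyB b)) x t := by
    simp [show PySem.List.insertBy (fun a b => decide (pvKeyB a < pvKeyB b)) x (h :: t)
        = if decide (pvKeyB x < pvKeyB h) then x :: h :: t
          else h :: PySem.List.insertBy (fun a b => decide (pvKeyB a < pvKeyB b)) x t from rfl]
  rw [hins]
  unfold pvMinG
  split_ifs <;> rfl

-- head of B's sort fold is the pvMinG fold over the remaining elements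
theorem pvFoldB_head (xs : List String) : ∀ (acc : List String) (h : String),
    acc.head? = some h →
    ((xs.foldl (fun a x => PySem.List.insertBy (fun a b => decide (pvKeyB a < pvKeyB b)) x a) acc).head?
      = some (xs.foldl pvMinG h)) := by
  induction xs with
  | nil => intro acc h hh; simpa using hh
  | cons x xs ih =>
    intro acc h hh
    cases acc with
    | nil => simp at hh
    | cons h' t =>
      simp only [List.head?_cons, Option.some.injEq] at hh
      subst hh
      simp only [List.foldl_cons]
      exact ih _ _ (pvHead_insertBy x _ t)

theorem pvMinG_self (x : String) : pvMinG x x = x := by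
  simp [pvMinG]

-- ===== VERDICT (by name: the statement is the Claim_ definition above) =====
theorem primeiro_lex_spec : Claim_equal_primeiro_lex := by
  intro lista _hdom hpre
  obtain ⟨hne, -⟩ := hpre
  obtain ⟨x, xs, rfl⟩ := List.exists_cons_of_ne_nil hne
  unfold Spec_primeiro_lex primeiro_lex primeiro_lex_alt
  simp only []
  -- A side: range fold over indices = fold over elements
  have hA : (PySem.List.pyRange 0 (PySem.List.len (x :: xs)) 1).foldl
      (fun st j => pvStepA st (PySem.List.pyGetD (x :: xs) j "")) (pvChA x, x)
      = (x :: xs).foldl pvStepA (pvChA x, x) :=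
    PySem.List.foldl_pyRange_zero_pyGetD (x :: xs) "" pvStepA (pvChA x, x)
  have h0 : PySem.List.pyGetD (x :: xs) 0 "" = x := by
    simp [PySem.List.pyGetD, PySem.List.pyGet?_zero_cons]
  -- B side: sorted = foldl insertBy, whose head is the pvMinG fold
  have hB : (PySem.List.sorted (x :: xs) pvKeyB false).head? = some (xs.foldl pvMinG x) := by
    rw [PySem.List.sorted_eq_foldl_insertBy]
    simp only [List.foldl_cons, PySem.List.insertBy]
    exact pvFoldB_head xs [x] x rfl
  have hBval : PySem.List.pyGetD (PySem.List.sorted (x :: xs) pvKeyB false) 0 ""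
      = xs.foldl pvMinG x := by
    rw [PySem.List.pyGetD, PySem.List.pyGet?_zero, ← List.head?_eq_getElem?, hB]
    rfl
  rw [h0, hA, hBval, pvFoldA_eq]
  simp only [List.foldl_cons, pvMinG_self]
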